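-- pv_equiv track=rewrite | github.com/rdues/traccovid | tracdash/unicodetokeniser/util.py | split_apostrophes
-- ===== SOURCE A (Python) =====
-- def index_of_one_of(string, targets):
-- 	i = 0
-- 	for c in string:
-- 		if c in targets:
-- 			return i
-- 		i += 1
-- 	return -1
--
-- APOSTROPHES_LIST = ['\u0027', '\u0091', '\u0092', '\u00B4', '\u02BC', '\u02CD', '\u2018', '\u2019', '\u201A', '\u201B', '\u0060']
--
-- def split_apostrophes(tokens):
-- 	new_tokens = []
--
-- 	t = 0
-- 	l = len(tokens)
-- 	while t < l:
-- 		token = tokens[t]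
-- 		while len(token) >= 3:
-- 			idx = index_of_one_of(token, APOSTROPHES_LIST)
-- 			if idx > 0 and idx < len(token)-1 and token[idx-1].isalpha() and token[idx+1].isalpha():
-- 				new_tokens.append(token[:idx])
-- 				new_tokens.append(token[idx])
-- 				token = token[idx+1:]
-- 			else:
-- 				break
-- 		if token:
-- 			new_tokens.append(token)
-- 		t += 1
--
-- 	return new_tokens
-- ===== SOURCE B (Python) =====
-- APOSTROPHES_LIST = ['\u0027', '\u0091', '\u0092', '\u00B4', '\u02BC', '\u02CD', '\u2018', '\u2019', '\u201A', '\u201B', '\u0060']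
-- _APO = set(APOSTROPHES_LIST)
--
-- def split_apostrophes(tokens):
-- 	out = []
-- 	for token in tokens:
-- 		seg = []          # chars of the current piece, in order
-- 		n = len(token)
-- 		k = 0
-- 		while k < n:
-- 			c = token[k]
-- 			if c in _APO:
-- 				if seg and seg[-1].isalpha() and k + 1 < n and token[k + 1].isalpha():
-- 					out.append(''.join(seg))
-- 					out.append(c)
-- 					seg = []
-- 				else:
-- 					# an apostrophe that does not split: keep the whole rest as one piece
-- 					out.append(''.join(seg) + token[k:])
-- 					seg = None
-- 					break
-- 			else:
-- 				seg.append(c)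
-- 			k += 1
-- 		if seg:
-- 			out.append(''.join(seg))
-- 	return out
-- ===== Notes on version B (the rewrite author's own statement) =====
-- stated objective: faster
-- what changed: A repeatedly rescans and reslices the remaining token from the start after every split (index_of_one_of + slicing, O(n^2) worst case per token); B makes one forward pass per token, accumulating the current piece and checking each apostrophe against its neighbours in place, O(n).
import Mathlib
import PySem

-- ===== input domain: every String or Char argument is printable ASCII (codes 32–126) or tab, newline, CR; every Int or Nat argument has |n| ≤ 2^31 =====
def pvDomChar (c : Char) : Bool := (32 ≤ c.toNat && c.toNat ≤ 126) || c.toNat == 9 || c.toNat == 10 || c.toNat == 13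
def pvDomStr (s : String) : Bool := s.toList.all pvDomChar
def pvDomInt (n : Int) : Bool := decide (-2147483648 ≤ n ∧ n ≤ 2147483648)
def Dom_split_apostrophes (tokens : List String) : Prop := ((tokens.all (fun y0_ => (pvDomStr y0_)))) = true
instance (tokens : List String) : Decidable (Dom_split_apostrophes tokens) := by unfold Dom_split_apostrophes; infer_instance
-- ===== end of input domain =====

-- B replaces A's repeated find-and-slice rescans of the token by one forward pass that
-- accumulates the current piece, so each token is scanned once (objective: faster).

def APOSTROPHES_LIST : List Char :=
  ['\u0027', Char.ofNat 0x91, Char.ofNat 0x92, Char.ofNat 0xB4, Char.ofNat 0x2BC,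
   Char.ofNat 0x2CD, Char.ofNat 0x2018, Char.ofNat 0x2019, Char.ofNat 0x201A,
   Char.ofNat 0x201B, Char.ofNat 0x60]

-- ===== PORT A =====
-- index_of_one_of: linear scan with counter i
def index_of_one_of (string : List Char) (targets : List Char) (i : Int) : Int :=
  match string with
  | [] => -1
  | c :: rest => if c ∈ targets then i else index_of_one_of rest targets (i + 1)

-- the inner `while len(token) >= 3` loop of A; acc = new_tokens so far, including the
-- trailing `if token: new_tokens.append(token)`.  token[idx-1]/token[idx]/token[idx+1]
-- via pyGet? (in the branch that uses them Python's short-circuit guard has them in range).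
def innerA (token : List Char) (acc : List String) : List String :=
  if 3 ≤ token.length then
    let idx := index_of_one_of token APOSTROPHES_LIST 0
    match PySem.List.pyGet? token (idx - 1), PySem.List.pyGet? token idx,
          PySem.List.pyGet? token (idx + 1) with
    | some p, some m, some q =>
      if h : 0 < idx ∧ idx < (token.length : Int) - 1 ∧
             PySem.Chars.isalpha p ∧ PySem.Chars.isalpha q then
        innerA (token.drop (idx + 1).toNat)
               (acc ++ [String.ofList (token.take idx.toNat), String.ofList [m]])
      else if token.isEmpty then acc else acc ++ [String.ofList token]
    | _, _, _ => if token.isEmpty then acc else acc ++ [String.ofList token]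
  else if token.isEmpty then acc else acc ++ [String.ofList token]
termination_by token.length
decreasing_by
  have h1 := h.1
  simp only [List.length_drop]
  omega

def split_apostrophes (tokens : List String) : List String :=
  tokens.foldl (fun acc token => innerA token.toList acc) []

-- ===== PORT B =====
-- one forward pass; seg = chars of the current piece (in order), out = result so far
def innerB (seg : List Char) (cs : List Char) (out : List String) : List String :=
  match cs with
  | [] => if seg.isEmpty then out else out ++ [String.ofList seg]
  | c :: rest =>
    if c ∈ APOSTROPHES_LIST then
      match seg.getLast?, rest with
      | some p, q :: _ =>
        if PySem.Chars.isalpha p && PySem.Chars.isalpha q then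
          innerB [] rest (out ++ [String.ofList seg, String.ofList [c]])
        else out ++ [String.ofList (seg ++ c :: rest)]      -- break: rest of token as one piece
      | _, _ => out ++ [String.ofList (seg ++ c :: rest)]   -- break
    else innerB (seg ++ [c]) rest out

def split_apostrophes_alt (tokens : List String) : List String :=
  tokens.foldl (fun out token => innerB [] token.toList out) []

-- ===== PRECONDITION & SPEC =====
def Spec_split_apostrophes (tokens : List String) (out : List String) : Prop := out = split_apostrophes_alt tokens
instance (tokens : List String) (out : List String) : Decidable (Spec_split_apostrophes tokens out) := by unfold Spec_split_apostrophes; infer_instance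

-- ===== CLAIM (what is proved, stated in full; the proofs are below) =====
def Claim_equal_split_apostrophes : Prop := ∀ (tokens : List String), Dom_split_apostrophes tokens → Spec_split_apostrophes tokens (split_apostrophes tokens)

-- ===== LEMMAS AND PROOFS =====

lemma innerA_acc : ∀ (n : Nat) (token : List Char), token.length ≤ n →
    ∀ acc, innerA token acc = acc ++ innerA token [] := by
  intro n
  induction n using Nat.strong_induction_on with
  | _ n ih =>
  intro token hlen acc
  rw [innerA]
  conv_rhs => rw [innerA]
  by_cases h3 : 3 ≤ token.length
  · rw [if_pos h3, if_pos h3]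
    simp only []
    rcases hp : PySem.List.pyGet? token (index_of_one_of token APOSTROPHES_LIST 0 - 1) with _ | p
    · simp only [hp]
      by_cases he : token.isEmpty <;> simp [he]
    rcases hm : PySem.List.pyGet? token (index_of_one_of token APOSTROPHES_LIST 0) with _ | m
    · simp only [hp, hm]
      by_cases he : token.isEmpty <;> simp [he]
    rcases hq : PySem.List.pyGet? token (index_of_one_of token APOSTROPHES_LIST 0 + 1) with _ | q
    · simp only [hp, hm, hq]
      by_cases he : token.isEmpty <;> simp [he]
    simp only [hp, hm, hq]
    split_ifs with hcond he
    · have hdrop : (token.drop (index_of_one_of token APOSTROPHES_LIST 0 + 1).toNat).length < n := by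
        have h0 := hcond.1
        simp only [List.length_drop]
        omega
      rw [ih _ hdrop _ (by omega) (acc ++ _), ih _ hdrop _ (by omega) ([] ++ _)]
      simp [List.append_assoc]
    · simp
    · simp
  · rw [if_neg h3, if_neg h3]
    by_cases he : token.isEmpty
    · simp [he]
    · simp [he]

lemma ioo_append (pre rest : List Char) (i : Int)
    (h : ∀ c ∈ pre, c ∉ APOSTROPHES_LIST) :
    index_of_one_of (pre ++ rest) APOSTROPHES_LIST i
      = index_of_one_of rest APOSTROPHES_LIST (i + pre.length) := by
  induction pre generalizing i with
  | nil => simp [index_of_one_of]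
  | cons c pre ih =>
    rw [List.cons_append, index_of_one_of, if_neg (h c (by simp))]
    rw [ih _ (fun d hd => h d (by simp [hd]))]
    congr 1
    push_cast [List.length_cons]
    ring

lemma innerA_nil : innerA [] [] = [] := by
  rw [innerA]
  simp

lemma innerA_break (t : List Char) (ht : t ≠ [])
    (h : ∀ p m q,
      PySem.List.pyGet? t (index_of_one_of t APOSTROPHES_LIST 0 - 1) = some p →
      PySem.List.pyGet? t (index_of_one_of t APOSTROPHES_LIST 0) = some m →
      PySem.List.pyGet? t (index_of_one_of t APOSTROPHES_LIST 0 + 1) = some q →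
      ¬(0 < index_of_one_of t APOSTROPHES_LIST 0 ∧
        index_of_one_of t APOSTROPHES_LIST 0 < (t.length : Int) - 1 ∧
        PySem.Chars.isalpha p ∧ PySem.Chars.isalpha q)) :
    innerA t [] = [String.ofList t] := by
  have hne : t.isEmpty = false := by simpa [List.isEmpty_iff] using ht
  rw [innerA]
  by_cases h3 : 3 ≤ t.length
  · rw [if_pos h3]
    simp only []
    rcases hp : PySem.List.pyGet? t (index_of_one_of t APOSTROPHES_LIST 0 - 1) with _ | p
    · simp [hp, hne]
    rcases hm : PySem.List.pyGet? t (index_of_one_of t APOSTROPHES_LIST 0) with _ | m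
    · simp [hp, hm, hne]
    rcases hq : PySem.List.pyGet? t (index_of_one_of t APOSTROPHES_LIST 0 + 1) with _ | q
    · simp [hp, hm, hq, hne]
    simp only [hp, hm, hq]
    rw [dif_neg (h p m q hp hm hq)]
    simp [hne]
  · rw [if_neg h3]
    simp [hne]

lemma ioo_none (t : List Char) (h : ∀ c ∈ t, c ∉ APOSTROPHES_LIST) :
    index_of_one_of t APOSTROPHES_LIST 0 = -1 := by
  have := ioo_append t [] 0 h
  simpa [index_of_one_of] using this

-- A's inner loop on a token with no splitting apostrophe (no apostrophe at all)
lemma innerA_noapo (t : List Char) (h : ∀ c ∈ t, c ∉ APOSTROPHES_LIST) :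
    innerA t [] = if t = [] then [] else [String.ofList t] := by
  rcases eq_or_ne t [] with hs | hs
  · simp [hs, innerA_nil]
  · rw [if_neg hs]
    apply innerA_break t hs
    intro p m q hp hm hq
    rw [ioo_none t h]
    rintro ⟨h0, -⟩
    omega

lemma innerB_eq : ∀ (cs seg : List Char) (out : List String),
    (∀ c ∈ seg, c ∉ APOSTROPHES_LIST) →
    innerB seg cs out = out ++ innerA (seg ++ cs) [] := by
  intro cs
  induction cs with
  | nil =>
    intro seg out hseg
    simp only [innerB, List.append_nil]
    rw [innerA_noapo seg hseg]
    rcases eq_or_ne seg [] with hs | hs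
    · simp [hs]
    · simp [hs, List.isEmpty_iff]
  | cons c rest ih =>
    intro seg out hseg
    simp only [innerB]
    by_cases hc : c ∈ APOSTROPHES_LIST
    · rw [if_pos hc]
      have hidx : index_of_one_of (seg ++ c :: rest) APOSTROPHES_LIST 0 = (seg.length : Int) := by
        rw [ioo_append seg (c :: rest) 0 hseg, index_of_one_of, if_pos hc]
        simp
      rcases hlast : seg.getLast? with _ | p
      · -- seg = []: the apostrophe is first; A breaks at once
        have hseg0 : seg = [] := by simpa [List.getLast?_eq_none_iff] using hlast
        subst hseg0
        have hA : innerA (c :: rest) [] = [String.ofList (c :: rest)] := by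
          apply innerA_break _ (by simp)
          intro p m q hp hm hq
          have h0 : index_of_one_of (c :: rest) APOSTROPHES_LIST 0 = 0 := by
            simpa using hidx
          rw [h0]
          rintro ⟨h1, -⟩
          omega
        simp [hA]
      · have hsegne : seg ≠ [] := by
          intro h0; rw [h0] at hlast; simp at hlast
        have hlen1 : 1 ≤ seg.length := by
          cases seg with
          | nil => exact absurd rfl hsegne
          | cons _ _ => simp
        have hLp : PySem.List.pyGet? (seg ++ c :: rest) ((seg.length : Int) - 1) = some p := by
          rw [PySem.List.pyGet?_of_nonneg (seg ++ c :: rest) (show (0:Int) ≤ (seg.length : Int) - 1 by omega)]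
          have htn : ((seg.length : Int) - 1).toNat = seg.length - 1 := by omega
          rw [htn, List.getElem?_append_left (by omega)]
          rw [← List.getLast?_eq_getElem?]
          exact hlast
        have hLc : PySem.List.pyGet? (seg ++ c :: rest) ((seg.length : Int)) = some c :=
          PySem.List.pyGet?_append_length seg rest c
        rcases rest with _ | ⟨q, rest'⟩
        · -- rest = []: apostrophe is last; A breaks
          have hA : innerA (seg ++ [c]) [] = [String.ofList (seg ++ [c])] := by
            apply innerA_break _ (by simp)
            intro p' m' q' hp' hm' hq'
            rw [hidx]
            rintro ⟨-, h2, -⟩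
            simp only [List.length_append, List.length_cons, List.length_nil] at h2
            omega
          simp [hA]
        · have hLq : PySem.List.pyGet? (seg ++ c :: q :: rest') ((seg.length : Int) + 1) = some q := by
            have := PySem.List.pyGet?_append_right seg (c :: q :: rest') 1
            simpa using this
          by_cases hal : (PySem.Chars.isalpha p && PySem.Chars.isalpha q) = true
          · dsimp only []
            rw [if_pos hal]
            have hal1 : PySem.Chars.isalpha p = true := by
              simp only [Bool.and_eq_true] at hal; exact hal.1
            have hal2 : PySem.Chars.isalpha q = true := by
              simp only [Bool.and_eq_true] at hal; exact hal.2
            have hA : innerA (seg ++ c :: q :: rest') []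
                = [String.ofList seg, String.ofList [c]] ++ innerA (q :: rest') [] := by
              rw [innerA]
              have h3 : 3 ≤ (seg ++ c :: q :: rest').length := by
                simp only [List.length_append, List.length_cons]
                omega
              rw [if_pos h3]
              simp only [hidx, hLp, hLc, hLq]
              have hcond : 0 < (seg.length : Int) ∧
                  (seg.length : Int) < ((seg ++ c :: q :: rest').length : Int) - 1 ∧
                  PySem.Chars.isalpha p = true ∧ PySem.Chars.isalpha q = true := by
                refine ⟨by omega, ?_, hal1, hal2⟩
                simp only [List.length_append, List.length_cons]
                push_cast
                omega
              rw [dif_pos hcond]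
              have htake : (seg ++ c :: q :: rest').take ((seg.length : Int)).toNat = seg := by
                simp
              have hdrop : (seg ++ c :: q :: rest').drop (((seg.length : Int)) + 1).toNat
                  = q :: rest' := by
                have ht1 : (((seg.length : Int)) + 1).toNat = seg.length + 1 := by omega
                rw [ht1, show seg ++ c :: q :: rest' = (seg ++ [c]) ++ q :: rest' by simp,
                    show seg.length + 1 = (seg ++ [c]).length by simp]
                exact List.drop_left
              rw [htake, hdrop, List.nil_append,
                  innerA_acc (q :: rest').length (q :: rest') le_rfl]
            rw [hA, ih [] (out ++ [String.ofList seg, String.ofList [c]]) (by simp)]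
            simp [List.append_assoc]
          · dsimp only []
            rw [if_neg hal]
            have hA : innerA (seg ++ c :: q :: rest') []
                = [String.ofList (seg ++ c :: q :: rest')] := by
              apply innerA_break _ (by simp)
              intro p' m' q' hp' hm' hq'
              rw [hidx] at hp' hq' ⊢
              rw [hLp] at hp'
              rw [hLq] at hq'
              rintro ⟨-, -, ha1, ha2⟩
              apply hal
              have hpe : p = p' := (Option.some.injEq _ _).mp hp'
              have hqe : q = q' := (Option.some.injEq _ _).mp hq'
              subst hpe hqe
              simp [ha1, ha2]
            simp [hA]
    · rw [if_neg hc]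
      rw [ih (seg ++ [c]) out ?side]
      · simp [List.append_assoc]
      · intro d hd
        rcases List.mem_append.mp hd with h1 | h1
        · exact hseg d h1
        · simp only [List.mem_singleton] at h1
          subst h1
          exact hc

-- ===== VERDICT (by name: the statement is the Claim_ definition above) =====
theorem split_apostrophes_spec : Claim_equal_split_apostrophes := by
  intro tokens _
  unfold Spec_split_apostrophes split_apostrophes split_apostrophes_alt
  have hfun : ∀ (acc : List String) (token : String),
      innerA token.toList acc = innerB [] token.toList acc := by
    intro acc token
    rw [innerB_eq _ _ _ (by simp), List.nil_append,
        innerA_acc token.toList.length token.toList le_rfl]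
  exact PySem.List.foldl_congr_mem tokens _ _ [] (fun acc token _ => hfun acc token)
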